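-- pv_equiv track=rewrite | github.com/nowireless4u/hpe-networking-mcp | src/hpe_networking_mcp/redaction/rules.py | looks_like_credential
-- ===== SOURCE A (Python) =====
-- def looks_like_credential(value: str) -> bool:
--     """Heuristic: does ``value`` look like a credential rather than an enum?
--
--     Used as a guard on the generic catch-all field names (``password``,
--     ``secret``, ``token``, ``key``) to suppress tokenization of
--     template-style placeholder values like ``{"key": "ssid"}`` or
--     ``{"secret": "auto"}``.
--
--     Returns True when:
--     * length >= 8, AND
--     * contains at least two of {lowercase, uppercase, digit, special}, OR
--     * contains at least one non-alphanumeric character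
--
--     Length-only check is too lax (an 8-char enum like ``disabled`` slips
--     through); character-class diversity is the discriminator.
--     """
--     if not isinstance(value, str) or len(value) < 8:
--         return False
--     has_lower = any(c.islower() for c in value)
--     has_upper = any(c.isupper() for c in value)
--     has_digit = any(c.isdigit() for c in value)
--     has_special = any(not c.isalnum() and not c.isspace() for c in value)
--     classes = sum((has_lower, has_upper, has_digit, has_special))
--     return classes >= 2 or has_special
-- ===== SOURCE B (Python) =====
-- def looks_like_credential(value: str) -> bool:
--     if not isinstance(value, str) or len(value) < 8:
--         return False
--     has_lower = has_upper = has_digit = has_special = False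
--     for c in value:
--         if c.islower():
--             has_lower = True
--         if c.isupper():
--             has_upper = True
--         if c.isdigit():
--             has_digit = True
--         if not c.isalnum() and not c.isspace():
--             has_special = True
--         if has_lower and has_upper and has_digit and has_special:
--             break
--     classes = has_lower + has_upper + has_digit + has_special
--     return classes >= 2 or has_special
-- ===== Notes on version B (the rewrite author's own statement) =====
-- stated objective: alternative
-- what changed: Replaces A's four separate any() scans over the string with a single loop that updates four flags per character and breaks early once all four classes are seen.
import Mathlib
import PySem

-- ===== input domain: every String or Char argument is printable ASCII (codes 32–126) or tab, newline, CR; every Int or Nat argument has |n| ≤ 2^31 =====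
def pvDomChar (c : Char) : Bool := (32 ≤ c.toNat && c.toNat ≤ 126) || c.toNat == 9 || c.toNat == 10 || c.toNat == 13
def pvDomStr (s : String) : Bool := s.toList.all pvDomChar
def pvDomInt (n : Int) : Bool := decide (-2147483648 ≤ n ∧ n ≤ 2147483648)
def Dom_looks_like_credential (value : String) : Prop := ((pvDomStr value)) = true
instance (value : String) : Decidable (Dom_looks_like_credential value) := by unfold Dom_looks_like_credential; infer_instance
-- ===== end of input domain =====

-- B replaces A's four separate any() scans with one flag-updating loop with early exit (alternative decomposition, same cost).

-- ===== PORT A =====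
def looks_like_credential (value : String) : Bool :=
  let cs := value.toList
  if cs.length < 8 then false
  else
    let has_lower := cs.any (fun c => PySem.Chars.islower c)
    let has_upper := cs.any (fun c => PySem.Chars.isupper c)
    let has_digit := cs.any (fun c => PySem.Chars.isdigit c)
    let has_special := cs.any (fun c => !PySem.Chars.isalnum c && !PySem.Chars.isspace c)
    let classes : Nat :=
      (cond has_lower 1 0) + (cond has_upper 1 0) + (cond has_digit 1 0) + (cond has_special 1 0)
    decide (classes ≥ 2) || has_special

-- ===== PORT B =====
-- single pass updating four flags, breaking once all are true
def credFlagsLoop : List Char → Bool → Bool → Bool → Bool → Bool × Bool × Bool × Bool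
  | [], l, u, d, s => (l, u, d, s)
  | c :: cs, l, u, d, s =>
    let l := l || PySem.Chars.islower c
    let u := u || PySem.Chars.isupper c
    let d := d || PySem.Chars.isdigit c
    let s := s || (!PySem.Chars.isalnum c && !PySem.Chars.isspace c)
    if l && u && d && s then (l, u, d, s)   -- break
    else credFlagsLoop cs l u d s

def looks_like_credential_alt (value : String) : Bool :=
  let cs := value.toList
  if cs.length < 8 then false
  else
    let (has_lower, has_upper, has_digit, has_special) :=
      credFlagsLoop cs false false false false
    let classes : Nat :=
      (cond has_lower 1 0) + (cond has_upper 1 0) + (cond has_digit 1 0) + (cond has_special 1 0)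
    decide (classes ≥ 2) || has_special

-- ===== PRECONDITION & SPEC =====
def Spec_looks_like_credential (value : String) (out : Bool) : Prop := out = looks_like_credential_alt value
instance (value : String) (out : Bool) : Decidable (Spec_looks_like_credential value out) := by unfold Spec_looks_like_credential; infer_instance

-- ===== CLAIM (what is proved, stated in full; the proofs are below) =====
def Claim_equal_looks_like_credential : Prop := ∀ (value : String), Dom_looks_like_credential value → Spec_looks_like_credential value (looks_like_credential value)

-- ===== LEMMAS AND PROOFS =====
theorem credFlagsLoop_eq (cs : List Char) (l u d s : Bool) :
    credFlagsLoop cs l u d s =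
      (l || cs.any (fun c => PySem.Chars.islower c),
       u || cs.any (fun c => PySem.Chars.isupper c),
       d || cs.any (fun c => PySem.Chars.isdigit c),
       s || cs.any (fun c => !PySem.Chars.isalnum c && !PySem.Chars.isspace c)) := by
  induction cs generalizing l u d s with
  | nil => simp [credFlagsLoop]
  | cons c cs ih =>
    simp only [credFlagsLoop, List.any_cons]
    split
    · rename_i h
      simp only [Bool.and_eq_true] at h
      obtain ⟨⟨⟨hl, hu⟩, hd⟩, hs⟩ := h
      simp only [← Bool.or_assoc, hl, hu, hd, hs, Bool.true_or]
    · rw [ih]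
      simp [Bool.or_assoc]

-- ===== VERDICT (by name: the statement is the Claim_ definition above) =====
theorem looks_like_credential_spec : Claim_equal_looks_like_credential := by
  intro value _
  unfold Spec_looks_like_credential looks_like_credential looks_like_credential_alt
  simp only [credFlagsLoop_eq, Bool.false_or]
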